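-- pv_equiv track=rewrite | github.com/pypi-data/pypi-mirror-148 | packages/utilum/utilum-0.1.3.tar.gz/utilum-0.1.3/utilum/file.py | slashMatch
-- ===== SOURCE A (Python) =====
-- def slashMatch(path,startslash,endslash):
--     slashCount=1
--     start_index=0
--     end_index=len(path)
--
--     for ip,p in enumerate(path):
--         if(p=="/"):
--             if(endslash!=-1):
--                 if(slashCount==startslash):
--                     start_index=ip+1
--                 if(slashCount== endslash):
--                     end_index=ip
--                 slashCount+=1
--             else:
--                 if(slashCount==startslash):
--                     start_index=ip+1
--                 slashCount+=1
--
--     return path[start_index:end_index]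
-- ===== SOURCE B (Python) =====
-- def slashMatch(path, startslash, endslash):
--     positions = [i for i, c in enumerate(path) if c == "/"]
--     start = positions[startslash - 1] + 1 if 1 <= startslash <= len(positions) else 0
--     end = positions[endslash - 1] if 1 <= endslash <= len(positions) else len(path)
--     return path[start:end]
-- ===== Notes on version B (the rewrite author's own statement) =====
-- stated objective: simpler
-- what changed: B builds the table of slash positions once and reads the two boundaries by direct guarded indexing, replacing A's single-accumulator scan that threads a slash counter and two mutable boundary indices through every character.
import Mathlib
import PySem

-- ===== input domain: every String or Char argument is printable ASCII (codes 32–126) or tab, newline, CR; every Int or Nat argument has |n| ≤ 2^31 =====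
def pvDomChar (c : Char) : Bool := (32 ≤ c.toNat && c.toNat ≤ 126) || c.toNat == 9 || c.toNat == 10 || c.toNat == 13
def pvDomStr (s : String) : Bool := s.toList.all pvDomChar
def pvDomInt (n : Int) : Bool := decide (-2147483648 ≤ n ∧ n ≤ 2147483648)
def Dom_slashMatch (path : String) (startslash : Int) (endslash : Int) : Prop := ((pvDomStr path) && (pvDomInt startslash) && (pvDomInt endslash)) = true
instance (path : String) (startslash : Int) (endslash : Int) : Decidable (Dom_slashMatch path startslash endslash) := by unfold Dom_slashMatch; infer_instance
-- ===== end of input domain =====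

-- B replaces A's counter-threading scan by a slash-position table with two guarded lookups (objective: simpler).

-- ===== PORT A =====
-- the loop body of A, step for step: start_index, then end_index, then slashCount += 1
def pvLoopA (startslash endslash : Int) (l : List (Int × Char)) (acc : Int × Int × Int) : Int × Int × Int :=
  l.foldl (fun acc pe =>
    if pe.2 = '/' then
      if endslash ≠ -1 then
        (acc.1 + 1,
         (if acc.1 = startslash then pe.1 + 1 else acc.2.1),
         (if acc.1 = endslash then pe.1 else acc.2.2))
      else
        (acc.1 + 1,
         (if acc.1 = startslash then pe.1 + 1 else acc.2.1),
         acc.2.2)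
    else acc) acc

def slashMatch (path : String) (startslash : Int) (endslash : Int) : String :=
  let r := pvLoopA startslash endslash (PySem.List.enumerate path.toList 0)
             (1, 0, (path.toList.length : Int))
  PySem.Str.slice path (some r.2.1) (some r.2.2)

-- ===== PORT B =====
-- positions = [i for i, c in enumerate(path) if c == "/"]
def pvPositions (l : List Char) (off : Int) : List Int :=
  (PySem.List.enumerate l off).filterMap (fun p => if p.2 = '/' then some p.1 else none)

def slashMatch_alt (path : String) (startslash : Int) (endslash : Int) : String :=
  let positions := pvPositions path.toList 0
  let start : Int :=
    if 1 ≤ startslash ∧ startslash ≤ (positions.length : Int)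
    then (PySem.List.pyGet? positions (startslash - 1)).getD 0 + 1 else 0
  let stop : Int :=
    if 1 ≤ endslash ∧ endslash ≤ (positions.length : Int)
    then (PySem.List.pyGet? positions (endslash - 1)).getD 0 else (path.toList.length : Int)
  PySem.Str.slice path (some start) (some stop)

-- ===== PRECONDITION & SPEC =====
def Spec_slashMatch (path : String) (startslash : Int) (endslash : Int) (out : String) : Prop := out = slashMatch_alt path startslash endslash
instance (path : String) (startslash : Int) (endslash : Int) (out : String) : Decidable (Spec_slashMatch path startslash endslash out) := by unfold Spec_slashMatch; infer_instance

-- ===== CLAIM (what is proved, stated in full; the proofs are below) =====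
def Claim_equal_slashMatch : Prop := ∀ (path : String) (startslash : Int) (endslash : Int), Dom_slashMatch path startslash endslash → Spec_slashMatch path startslash endslash (slashMatch path startslash endslash)

-- ===== LEMMAS AND PROOFS =====

lemma pvPositions_nil (off : Int) : pvPositions [] off = [] := rfl

lemma pvPositions_cons (x : Char) (l : List Char) (off : Int) :
    pvPositions (x :: l) off =
      (if x = '/' then [off] else []) ++ pvPositions l (off + 1) := by
  rw [pvPositions, PySem.List.enumerate_cons, List.filterMap_cons]
  by_cases hx : x = '/' <;> simp [hx, pvPositions]

lemma pvLoopA_eq (s e : Int) (l : List Char) (off c si ei : Int) :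
    pvLoopA s e (PySem.List.enumerate l off) (c, si, ei) =
      (c + ((pvPositions l off).length : Int),
       (if 1 ≤ s - c + 1 ∧ s - c + 1 ≤ ((pvPositions l off).length : Int)
        then (PySem.List.pyGet? (pvPositions l off) (s - c)).getD 0 + 1 else si),
       (if e ≠ -1 ∧ 1 ≤ e - c + 1 ∧ e - c + 1 ≤ ((pvPositions l off).length : Int)
        then (PySem.List.pyGet? (pvPositions l off) (e - c)).getD 0 else ei)) := by
  induction l generalizing off c si ei with
  | nil =>
      simp only [pvPositions_nil, PySem.List.enumerate_nil, pvLoopA, List.foldl_nil,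
        List.length_nil, Nat.cast_zero, add_zero]
      rw [if_neg (by omega), if_neg (by omega)]
  | cons x t ih =>
      rw [PySem.List.enumerate_cons]
      by_cases hx : x = '/'
      · have hstep : pvLoopA s e ((off, x) :: PySem.List.enumerate t (off + 1)) (c, si, ei)
            = pvLoopA s e (PySem.List.enumerate t (off + 1))
                (c + 1, (if c = s then off + 1 else si),
                 (if e ≠ -1 ∧ c = e then off else ei)) := by
          simp only [pvLoopA, List.foldl_cons, hx]
          by_cases he : e = -1 <;> simp [he]
        rw [hstep, ih, pvPositions_cons, if_pos hx, List.singleton_append]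
        simp only [List.length_cons]
        push_cast
        refine Prod.ext (by omega) (Prod.ext ?_ ?_) <;> simp only
        · by_cases hs : s = c
          · rw [if_neg (by omega), if_pos hs.symm, if_pos (by omega),
               show s - c = 0 from by omega, PySem.List.pyGet?_zero_cons]
            rfl
          · by_cases hin : 1 ≤ s - (c + 1) + 1 ∧ s - (c + 1) + 1 ≤ ((pvPositions t (off + 1)).length : Int)
            · rw [if_pos hin, if_pos (by omega),
                 show s - c = (((s - c - 1).toNat : Int)) + 1 from by omega,
                 PySem.List.pyGet?_cons_succ,
                 show s - (c + 1) = ((s - c - 1).toNat : Int) from by omega]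
            · rw [if_neg hin, if_neg (by omega), if_neg (by omega)]
        · by_cases he : e = -1
          · rw [if_neg (by simp [he]), if_neg (by simp [he]), if_neg (by simp [he])]
          · by_cases hs : e = c
            · rw [if_neg (by omega), if_pos ⟨he, hs.symm⟩, if_pos ⟨he, by omega, by omega⟩,
                 show e - c = 0 from by omega, PySem.List.pyGet?_zero_cons]
              rfl
            · by_cases hin : 1 ≤ e - (c + 1) + 1 ∧ e - (c + 1) + 1 ≤ ((pvPositions t (off + 1)).length : Int)
              · rw [if_pos ⟨he, hin⟩, if_pos ⟨he, by omega, by omega⟩,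
                   show e - c = (((e - c - 1).toNat : Int)) + 1 from by omega,
                   PySem.List.pyGet?_cons_succ,
                   show e - (c + 1) = ((e - c - 1).toNat : Int) from by omega]
              · rw [if_neg (by omega), if_neg (by omega), if_neg (by omega)]
      · have hstep : pvLoopA s e ((off, x) :: PySem.List.enumerate t (off + 1)) (c, si, ei)
            = pvLoopA s e (PySem.List.enumerate t (off + 1)) (c, si, ei) := by
          simp [pvLoopA, hx]
        rw [hstep, ih, pvPositions_cons, if_neg hx, List.nil_append]

-- ===== VERDICT (by name: the statement is the Claim_ definition above) =====
theorem slashMatch_spec : Claim_equal_slashMatch := by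
  intro path s e _
  unfold Spec_slashMatch
  simp only [slashMatch, slashMatch_alt, pvPositions]
  rw [show (PySem.List.enumerate path.toList 0).filterMap
        (fun p => if p.2 = '/' then some p.1 else none) = pvPositions path.toList 0 from rfl,
     pvLoopA_eq]
  simp only
  by_cases h1 : 1 ≤ s ∧ s ≤ ((pvPositions path.toList 0).length : Int) <;>
    by_cases h2 : 1 ≤ e ∧ e ≤ ((pvPositions path.toList 0).length : Int)
  · rw [if_pos (by omega), if_pos h1, if_pos (by constructor <;> omega), if_pos h2]
  · rw [if_pos (by omega), if_pos h1, if_neg (by omega), if_neg h2]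
  · rw [if_neg (by omega), if_neg h1, if_pos (by constructor <;> omega), if_pos h2]
  · rw [if_neg (by omega), if_neg h1, if_neg (by omega), if_neg h2]
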